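-- pv_equiv track=rewrite | github.com/credentum/veris-memory | src/evaluation/safety_rails.py | _assess_security_risk
-- ===== SOURCE A (Python) =====
-- from typing import Dict, List, Optional, Any, Tuple, Union, Set
--
-- def _assess_security_risk(security_issues: List[Dict[str, Any]]) -> str:
--     """Assess overall security risk level."""
--
--     if not security_issues:
--         return "none"
--
--     severity_scores = {'low': 1, 'medium': 2, 'high': 3, 'critical': 4}
--     max_severity = max(severity_scores.get(issue['severity'], 0) for issue in security_issues)
--
--     if max_severity >= 4:
--         return "critical"
--     elif max_severity >= 3:
--         return "high"
--     elif max_severity >= 2: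
--         return "medium"
--     else:
--         return "low"
-- ===== SOURCE B (Python) =====
-- def _assess_security_risk(security_issues):
--     """Assess overall security risk level."""
--     if not security_issues:
--         return "none"
--     severities = {issue['severity'] for issue in security_issues}
--     if 'critical' in severities:
--         return 'critical'
--     if 'high' in severities:
--         return 'high'
--     if 'medium' in severities:
--         return 'medium'
--     return 'low'
-- ===== Notes on version B (the rewrite author's own statement) =====
-- stated objective: simpler
-- what changed: Replaces the numeric severity-score dict and the max() reduction with a set of severity strings checked by priority-ordered membership tests.
import Mathlib
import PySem

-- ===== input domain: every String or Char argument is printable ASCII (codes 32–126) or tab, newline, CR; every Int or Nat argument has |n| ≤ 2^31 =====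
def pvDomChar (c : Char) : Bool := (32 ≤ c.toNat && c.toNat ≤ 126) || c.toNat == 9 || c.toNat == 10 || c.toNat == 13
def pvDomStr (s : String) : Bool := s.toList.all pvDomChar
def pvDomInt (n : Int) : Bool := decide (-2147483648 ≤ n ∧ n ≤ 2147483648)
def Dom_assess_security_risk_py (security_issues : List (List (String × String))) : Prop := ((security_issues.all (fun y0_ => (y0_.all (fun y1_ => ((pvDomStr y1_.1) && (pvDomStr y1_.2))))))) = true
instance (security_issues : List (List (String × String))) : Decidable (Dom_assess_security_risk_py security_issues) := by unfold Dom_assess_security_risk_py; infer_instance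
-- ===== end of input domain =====

-- B replaces the numeric severity-score dict and the max() reduction with a set of
-- severity strings checked by priority-ordered membership tests (objective: simpler).


-- ===== PORT A =====
-- severity_scores dict literal
def pvScores : PySem.Dict String Int :=
  PySem.Dict.mk [("low", 1), ("medium", 2), ("high", 3), ("critical", 4)]

-- issue['severity']: first-match lookup; Pre_ guarantees the key is present, so getD "" is never reached
def pvSev (issue : List (String × String)) : String :=
  ((PySem.Dict.mk issue).get? "severity").getD ""

def assess_security_risk_py (security_issues : List (List (String × String))) : String :=
  if security_issues = [] then "none"
  else
    let vals := security_issues.map (fun issue => pvScores.getD (pvSev issue) 0)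
    match PySem.List.max? vals (fun v => v) with
    | some max_severity =>
        if max_severity ≥ 4 then "critical"
        else if max_severity ≥ 3 then "high"
        else if max_severity ≥ 2 then "medium"
        else "low"
    | none => "low"   -- unreachable: security_issues ≠ []

-- ===== PORT B =====
def assess_security_risk_py_alt (security_issues : List (List (String × String))) : String :=
  if security_issues = [] then "none"
  else
    let severities := PySem.Set.ofList (security_issues.map pvSev)
    if severities.contains "critical" then "critical"
    else if severities.contains "high" then "high"
    else if severities.contains "medium" then "medium"
    else "low"

-- ===== PRECONDITION & SPEC =====
-- Pre_ excludes issues lacking a 'severity' key, on which Python A raises KeyError.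
def Pre_assess_security_risk_py (security_issues : List (List (String × String))) : Prop :=
  ∀ issue ∈ security_issues, (issue.map Prod.fst).contains "severity" = true
instance (security_issues : List (List (String × String))) : Decidable (Pre_assess_security_risk_py security_issues) := by unfold Pre_assess_security_risk_py; infer_instance
def pvWitness_assess_security_risk_py : (List (List (String × String))) := [[("severity", "high")]]

def Spec_assess_security_risk_py (security_issues : List (List (String × String))) (out : String) : Prop := out = assess_security_risk_py_alt security_issues
instance (security_issues : List (List (String × String))) (out : String) : Decidable (Spec_assess_security_risk_py security_issues out) := by unfold Spec_assess_security_risk_py; infer_instance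

-- ===== CLAIM (what is proved, stated in full; the proofs are below) =====
def Claim_equal_assess_security_risk_py : Prop := ∀ (security_issues : List (List (String × String))), Dom_assess_security_risk_py security_issues → Pre_assess_security_risk_py security_issues → Spec_assess_security_risk_py security_issues (assess_security_risk_py security_issues)

-- ===== LEMMAS AND PROOFS =====

-- pvScores.getD s 0 as an explicit case split
lemma score_cases (s : String) :
    pvScores.getD s 0 =
      if s = "low" then 1 else if s = "medium" then 2 else if s = "high" then 3
      else if s = "critical" then 4 else 0 := by
  by_cases h1 : s = "low"
  · subst h1; decide
  by_cases h2 : s = "medium"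
  · subst h2; decide
  by_cases h3 : s = "high"
  · subst h3; decide
  by_cases h4 : s = "critical"
  · subst h4; decide
  have e1 : ("low" == s) = false := beq_eq_false_iff_ne.mpr (Ne.symm h1)
  have e2 : ("medium" == s) = false := beq_eq_false_iff_ne.mpr (Ne.symm h2)
  have e3 : ("high" == s) = false := beq_eq_false_iff_ne.mpr (Ne.symm h3)
  have e4 : ("critical" == s) = false := beq_eq_false_iff_ne.mpr (Ne.symm h4)
  simp [pvScores, PySem.Dict.getD, PySem.Dict.get?, List.find?, e1, e2, e3, e4, h1, h2, h3, h4]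

lemma score_ge_four (s : String) : pvScores.getD s 0 ≥ 4 ↔ s = "critical" := by
  rw [score_cases]; split_ifs <;> simp_all

lemma score_ge_three (s : String) : pvScores.getD s 0 ≥ 3 ↔ s = "critical" ∨ s = "high" := by
  rw [score_cases]; split_ifs <;> simp_all

lemma score_ge_two (s : String) :
    pvScores.getD s 0 ≥ 2 ↔ s = "critical" ∨ s = "high" ∨ s = "medium" := by
  rw [score_cases]; split_ifs <;> simp_all

-- the running max of scores is ≥ k iff the accumulator is, or some element scores ≥ k
lemma foldl_max_ge (l : List String) (a k : Int) :
    l.foldl (fun x s => max x (pvScores.getD s 0)) a ≥ k ↔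
      a ≥ k ∨ ∃ s ∈ l, pvScores.getD s 0 ≥ k := by
  induction l generalizing a with
  | nil => simp
  | cons h t ih =>
      simp only [List.foldl_cons, ih, ge_iff_le, le_max_iff, List.mem_cons]
      constructor
      · rintro (⟨h1 | h1⟩ | ⟨s, hs, h2⟩)
        · exact Or.inl h1
        · exact Or.inr ⟨h, Or.inl rfl, h1⟩
        · exact Or.inr ⟨s, Or.inr hs, h2⟩
      · rintro (h1 | ⟨s, (rfl | hs), h2⟩)
        · exact Or.inl (Or.inl h1)
        · exact Or.inl (Or.inr h2)
        · exact Or.inr ⟨s, hs, h2⟩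

theorem assess_py_equiv (security_issues : List (List (String × String))) :
    assess_security_risk_py security_issues = assess_security_risk_py_alt security_issues := by
  unfold assess_security_risk_py assess_security_risk_py_alt
  cases security_issues with
  | nil => simp
  | cons i t =>
      simp only [if_neg (List.cons_ne_nil i t)]
      have hmap : (i :: t).map (fun issue => pvScores.getD (pvSev issue) 0)
          = pvScores.getD (pvSev i) 0 :: (t.map pvSev).map (fun s => pvScores.getD s 0) := by
        simp [List.map_map, Function.comp]
      rw [hmap, PySem.List.max?_id_cons]
      have key : ∀ k : Int,
          ((t.map pvSev).map (fun s => pvScores.getD s 0)).foldl max (pvScores.getD (pvSev i) 0) ≥ k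
            ↔ ∃ s ∈ (i :: t).map pvSev, pvScores.getD s 0 ≥ k := by
        intro k
        rw [List.foldl_map, foldl_max_ge, List.map_cons, List.exists_mem_cons_iff]
      have h4 := key 4
      have h3 := key 3
      have h2 := key 2
      simp only [score_ge_four, score_ge_three, score_ge_two, exists_or, and_or_left,
        exists_eq_right] at h4 h3 h2
      have hmem : ∀ c : String,
          ((PySem.Set.ofList ((i :: t).map pvSev)).contains c = true) ↔ c ∈ (i :: t).map pvSev :=
        fun c => by rw [PySem.Set.contains_iff]; exact PySem.Set.mem_ofList ((i :: t).map pvSev) c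
      dsimp only
      simp only [hmem]
      split_ifs <;> first | rfl | tauto

-- ===== VERDICT (by name: the statement is the Claim_ definition above) =====
theorem assess_security_risk_py_spec : Claim_equal_assess_security_risk_py := by
  intro xs _ _
  unfold Spec_assess_security_risk_py
  exact assess_py_equiv xs
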